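-- pv_equiv track=rewrite | github.com/tommaso-bonetti/ID2211 | tweets.py | summarize_label
-- ===== SOURCE A (Python) =====
-- def summarize_label(labels: list[str]):
-- 	unique_labels = set(labels)
-- 	if len(unique_labels) == 1:
-- 		return labels[0]
--
-- 	if 'N' in unique_labels:
-- 		return summarize_label(list(unique_labels - {'N'}))
-- 	if 'Q' in unique_labels:
-- 		return summarize_label(list(unique_labels - {'Q'}))
--
-- 	if all([label[0] == 'R' for label in unique_labels]):
-- 		return 'RT'
-- 	if all([label[0] == 'A' for label in unique_labels]):
-- 		return 'AT'
--
-- 	return 'U'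
-- ===== SOURCE B (Python) =====
-- def summarize_label(labels: list[str]):
-- 	remaining = set(labels)
-- 	for tag in ('N', 'Q'):
-- 		if len(remaining) == 1:
-- 			return next(iter(remaining))
-- 		remaining.discard(tag)
-- 	if len(remaining) == 1:
-- 		return next(iter(remaining))
-- 	if all(label.startswith('R') for label in remaining):
-- 		return 'RT'
-- 	if all(label.startswith('A') for label in remaining):
-- 		return 'AT'
-- 	return 'U'
-- ===== Notes on version B (the rewrite author's own statement) =====
-- stated objective: idiomatic
-- what changed: A's tail recursion (rebuilding the set and re-entering the function after each removal of 'N'/'Q') is replaced by one explicit loop over the two removable tags with set.discard, and the final category checks use startswith instead of label[0].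
import Mathlib
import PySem

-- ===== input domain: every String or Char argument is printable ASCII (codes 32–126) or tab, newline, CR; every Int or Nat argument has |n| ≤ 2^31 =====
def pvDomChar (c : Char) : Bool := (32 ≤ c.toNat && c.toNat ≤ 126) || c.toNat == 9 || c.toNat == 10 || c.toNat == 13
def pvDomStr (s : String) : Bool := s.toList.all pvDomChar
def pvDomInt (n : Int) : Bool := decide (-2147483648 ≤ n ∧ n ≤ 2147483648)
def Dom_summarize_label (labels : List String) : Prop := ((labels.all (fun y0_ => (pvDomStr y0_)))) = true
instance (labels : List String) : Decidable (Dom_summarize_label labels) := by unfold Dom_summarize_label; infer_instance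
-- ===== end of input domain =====

-- B replaces A's tail recursion (rebuilding a set and re-entering the function after each removal)
-- by one explicit loop over the two removable tags with `startswith` final checks; objective: idiomatic.

-- ===== PORT A =====
def summarize_label (labels : List String) : String :=
  let u := PySem.Set.ofList labels
  if PySem.Set.len u = 1 then (PySem.List.pyGet? labels 0).getD ""
  else if PySem.Set.contains u "N" then summarize_label (PySem.Set.diff u ["N"])
  else if PySem.Set.contains u "Q" then summarize_label (PySem.Set.diff u ["Q"])
  else if (u.map (fun label => PySem.Str.pyGet? label 0 == some 'R')).all id then "RT"
  else if (u.map (fun label => PySem.Str.pyGet? label 0 == some 'A')).all id then "AT"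
  else "U"
termination_by labels.length
decreasing_by
  · exact lt_of_lt_of_le
      (List.length_filter_lt_length_iff_exists.mpr
        ⟨"N", (PySem.Set.contains_iff _ _).mp (by assumption), by simp⟩)
      (PySem.Set.length_ofList_le labels)
  · exact lt_of_lt_of_le
      (List.length_filter_lt_length_iff_exists.mpr
        ⟨"Q", (PySem.Set.contains_iff _ _).mp (by assumption), by simp⟩)
      (PySem.Set.length_ofList_le labels)

-- ===== PORT B =====
-- the `for tag in ('N', 'Q')` loop with its early `return` on a singleton
def pvBLoop (s : PySem.Set String) : List String → PySem.Set String ⊕ String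
  | [] => Sum.inl s
  | tag :: tags =>
      if PySem.Set.len s = 1 then Sum.inr (s.headD "")
      else pvBLoop (PySem.Set.discard s tag) tags

def summarize_label_alt (labels : List String) : String :=
  match pvBLoop (PySem.Set.ofList labels) ["N", "Q"] with
  | Sum.inr r => r
  | Sum.inl s =>
      if PySem.Set.len s = 1 then s.headD ""
      else if s.all (fun label => PySem.Str.startswith label "R") then "RT"
      else if s.all (fun label => PySem.Str.startswith label "A") then "AT"
      else "U"

-- ===== PRECONDITION & SPEC =====
-- Pre_ excludes exactly the inputs on which A raises IndexError: those containing the empty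
-- string while at least two distinct labels other than "N" and "Q" are present (A then reaches
-- `label[0]` on the empty string).
def Pre_summarize_label (labels : List String) : Prop :=
  ¬("" ∈ labels ∧
     2 ≤ ((PySem.Set.ofList labels).filter (fun l => l != "N" && l != "Q")).length)
instance (labels : List String) : Decidable (Pre_summarize_label labels) := by
  unfold Pre_summarize_label; infer_instance
def pvWitness_summarize_label : List String := ["N", "R1", "R2"]


def Spec_summarize_label (labels : List String) (out : String) : Prop := out = summarize_label_alt labels
instance (labels : List String) (out : String) : Decidable (Spec_summarize_label labels out) := by
  unfold Spec_summarize_label; infer_instance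

-- ===== CLAIM (what is proved, stated in full; the proofs are below) =====
def Claim_equal_summarize_label : Prop := ∀ (labels : List String), Dom_summarize_label labels → Pre_summarize_label labels → Spec_summarize_label labels (summarize_label labels)

-- ===== LEMMAS AND PROOFS =====

-- the filter predicate of Pre_: labels other than "N" and "Q"
def pvP (l : String) : Bool := l != "N" && l != "Q"

-- B's final block after the loop, as a named expression (proof bookkeeping only)
def pvTail (s : PySem.Set String) : String :=
  if PySem.Set.len s = 1 then s.headD ""
  else if s.all (fun label => PySem.Str.startswith label "R") then "RT"
  else if s.all (fun label => PySem.Str.startswith label "A") then "AT"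
  else "U"

theorem pv_alt_eq (labels : List String) :
    summarize_label_alt labels =
      match pvBLoop (PySem.Set.ofList labels) ["N", "Q"] with
      | Sum.inl s => pvTail s
      | Sum.inr r => r := by
  unfold summarize_label_alt pvTail
  cases pvBLoop (PySem.Set.ofList labels) ["N", "Q"] <;> rfl

theorem pv_A_eq (labels : List String) :
    summarize_label labels =
      (if PySem.Set.len (PySem.Set.ofList labels) = 1 then (PySem.List.pyGet? labels 0).getD ""
       else if PySem.Set.contains (PySem.Set.ofList labels) "N" then
         summarize_label (PySem.Set.diff (PySem.Set.ofList labels) ["N"])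
       else if PySem.Set.contains (PySem.Set.ofList labels) "Q" then
         summarize_label (PySem.Set.diff (PySem.Set.ofList labels) ["Q"])
       else if ((PySem.Set.ofList labels).map (fun label => PySem.Str.pyGet? label 0 == some 'R')).all id then "RT"
       else if ((PySem.Set.ofList labels).map (fun label => PySem.Str.pyGet? label 0 == some 'A')).all id then "AT"
       else "U") := by
  rw [summarize_label.eq_def]

theorem pv_bloop_cons (s : PySem.Set String) (t : String) (ts : List String) :
    pvBLoop s (t :: ts) =
      if PySem.Set.len s = 1 then Sum.inr (s.headD "") else pvBLoop (PySem.Set.discard s t) ts := rfl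

theorem pv_bloop_nil (s : PySem.Set String) : pvBLoop s [] = Sum.inl s := rfl

theorem pv_len_eq (s : PySem.Set String) : PySem.Set.len s = s.length := rfl

-- set difference with a singleton is discard
theorem pv_diff_singleton (s : PySem.Set String) (a : String) :
    PySem.Set.diff s [a] = PySem.Set.discard s a := by
  show List.filter _ s = List.filter _ s
  refine List.filter_congr ?_
  intro x _
  show (!([a].contains x)) = (!(x == a))
  simp only [List.contains, List.elem_cons, List.elem_nil]
  cases x == a <;> rfl

theorem pv_discard_not_mem (s : PySem.Set String) (a : String) (h : a ∉ s) :
    PySem.Set.discard s a = s := by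
  refine List.filter_eq_self.mpr ?_
  intro x hx
  have hf : (x == a) = false := beq_eq_false_iff_ne.mpr (fun he => h (he ▸ hx))
  rw [hf]
  rfl

-- labels[0] equals the head of set(labels) (first-insertion order)
theorem pv_head_eq (labels : List String) (h : labels ≠ []) :
    (PySem.List.pyGet? labels 0).getD "" = (PySem.Set.ofList labels).headD "" := by
  cases labels with
  | nil => exact absurd rfl h
  | cons a t => simp [PySem.Set.ofList_cons]

theorem pv_contains_false (s : PySem.Set String) (a : String) (h : a ∉ s) :
    PySem.Set.contains s a = false :=
  Bool.eq_false_iff.mpr (fun hc => h ((PySem.Set.contains_iff s a).mp hc))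

-- A's `label[0] == c` check agrees with B's `startswith` on lists without the empty string
theorem pv_all_eq (w : List String) (h : "" ∉ w) (c : Char) :
    (w.map (fun label => PySem.Str.pyGet? label 0 == some c)).all id
      = w.all (fun label => PySem.Str.startswith label (String.ofList [c])) := by
  rw [List.all_map]
  apply Bool.eq_iff_iff.mpr
  simp only [List.all_eq_true]
  refine forall_congr' fun l => imp_congr_right fun hl => ?_
  have hne : l.toList ≠ [] := by
    intro he
    apply h
    have : l = "" := by cases l; simp_all
    exact this ▸ hl
  cases hlt : l.toList with
  | nil => exact absurd hlt hne
  | cons a t =>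
    have h0 : PySem.Str.pyGet? l 0 = some a := by
      simp only [PySem.Str.pyGet?_eq, PySem.Chars.pyGet?_eq_listPyGet?,
        PySem.List.pyGet?_zero, hlt]
      rfl
    show ((PySem.Str.pyGet? l 0 == some c) = true) ↔ (PySem.Str.startswith l (String.ofList [c]) = true)
    simp only [h0, beq_iff_eq, Option.some.injEq, PySem.Str.startswith_eq, String.toList_ofList]
    rw [hlt]
    simp only [PySem.Chars.startswith, List.isPrefixOf, Bool.and_true, beq_iff_eq]
    exact eq_comm

-- last stage: no "N"/"Q" left, A's remaining body equals B's final block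
theorem pv_stage3 (w : List String) (hnd : w.Nodup) (hN : "N" ∉ w) (hQ : "Q" ∉ w)
    (hw : "" ∈ w → w.length ≤ 1) :
    summarize_label w = pvTail w := by
  rw [pv_A_eq]
  simp only [PySem.Set.ofList_eq_self_of_nodup w hnd]
  unfold pvTail
  by_cases hlen : PySem.Set.len w = 1
  · rw [if_pos hlen, if_pos hlen]
    have hne : w ≠ [] := by
      intro he; rw [pv_len_eq, he] at hlen; simp at hlen
    rw [pv_head_eq w hne, PySem.Set.ofList_eq_self_of_nodup w hnd]
  · have hempty : "" ∉ w := by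
      intro he
      have hle := hw he
      have hl1 : w.length ≠ 1 := by rw [pv_len_eq] at hlen; omega
      have h0 : w.length = 0 := by omega
      exact absurd (List.length_eq_zero_iff.mp h0 ▸ he) (List.not_mem_nil)
    rw [if_neg hlen, if_neg hlen,
        if_neg (by rw [pv_contains_false w "N" hN]; exact Bool.false_ne_true),
        if_neg (by rw [pv_contains_false w "Q" hQ]; exact Bool.false_ne_true),
        pv_all_eq w hempty 'R', pv_all_eq w hempty 'A']

-- middle stage: after the "N" step, A's recursion equals B's loop on the remaining tag
theorem pv_stage2 (labels : List String) (hN : "N" ∉ PySem.Set.ofList labels)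
    (hv : "" ∈ PySem.Set.ofList labels → ((PySem.Set.ofList labels).filter pvP).length ≤ 1) :
    summarize_label labels =
      (match pvBLoop (PySem.Set.ofList labels) ["Q"] with
       | Sum.inl s => pvTail s
       | Sum.inr r => r) := by
  have hnd := PySem.Set.nodup_ofList labels
  rw [pv_A_eq, pv_bloop_cons]
  by_cases hlen : PySem.Set.len (PySem.Set.ofList labels) = 1
  · rw [if_pos hlen, if_pos hlen]
    have hne : labels ≠ [] := by
      intro he; subst he; exact absurd hlen (by decide)
    exact pv_head_eq labels hne
  · rw [if_neg hlen, if_neg hlen,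
        if_neg (by rw [pv_contains_false _ "N" hN]; exact Bool.false_ne_true), pv_bloop_nil]
    by_cases hQm : "Q" ∈ PySem.Set.ofList labels
    · rw [if_pos ((PySem.Set.contains_iff _ "Q").mpr hQm), pv_diff_singleton]
      refine pv_stage3 _ (PySem.Set.nodup_discard _ "Q" hnd)
        (fun hc => hN ((PySem.Set.mem_discard _ "Q" "N").mp hc).1)
        (fun hc => ((PySem.Set.mem_discard _ "Q" "Q").mp hc).2 rfl) ?_
      intro he
      have hev : "" ∈ PySem.Set.ofList labels := ((PySem.Set.mem_discard _ "Q" "").mp he).1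
      have hfe : PySem.Set.discard (PySem.Set.ofList labels) "Q"
          = (PySem.Set.ofList labels).filter pvP := by
        show List.filter _ _ = List.filter _ _
        refine List.filter_congr ?_
        intro x hx
        have hxN : (x == "N") = false := beq_eq_false_iff_ne.mpr (fun he' => hN (he' ▸ hx))
        show (!(x == "Q")) = ((!(x == "N")) && (!(x == "Q")))
        rw [hxN]
        cases x == "Q" <;> rfl
      rw [hfe]
      exact hv hev
    · rw [if_neg (by rw [pv_contains_false _ "Q" hQm]; exact Bool.false_ne_true),
          pv_discard_not_mem _ "Q" hQm]
      have hempty : "" ∉ PySem.Set.ofList labels := by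
        intro he
        have hle := hv he
        have hfe : (PySem.Set.ofList labels).filter pvP = PySem.Set.ofList labels := by
          refine List.filter_eq_self.mpr ?_
          intro x hx
          have hxN : (x == "N") = false := beq_eq_false_iff_ne.mpr (fun he' => hN (he' ▸ hx))
          have hxQ : (x == "Q") = false := beq_eq_false_iff_ne.mpr (fun he' => hQm (he' ▸ hx))
          show ((!(x == "N")) && (!(x == "Q"))) = true
          rw [hxN, hxQ]
          rfl
        rw [hfe] at hle
        have hl1 : (PySem.Set.ofList labels).length ≠ 1 := by rw [pv_len_eq] at hlen; omega
        have h0 : (PySem.Set.ofList labels).length = 0 := by omega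
        exact absurd (List.length_eq_zero_iff.mp h0 ▸ he) (List.not_mem_nil)
      show _ = pvTail (PySem.Set.ofList labels)
      unfold pvTail
      rw [if_neg hlen, pv_all_eq _ hempty 'R', pv_all_eq _ hempty 'A']

theorem pv_main (labels : List String) (h : Pre_summarize_label labels) :
    summarize_label labels = summarize_label_alt labels := by
  have hnd := PySem.Set.nodup_ofList labels
  have hP : "" ∈ PySem.Set.ofList labels → ((PySem.Set.ofList labels).filter pvP).length ≤ 1 := by
    intro he
    unfold Pre_summarize_label at h
    have hn : ¬ (2 ≤ ((PySem.Set.ofList labels).filter (fun l => l != "N" && l != "Q")).length) :=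
      fun hge => h ⟨(PySem.Set.mem_ofList labels "").mp he, hge⟩
    unfold pvP
    omega
  rw [pv_alt_eq, pv_bloop_cons]
  by_cases hlen : PySem.Set.len (PySem.Set.ofList labels) = 1
  · rw [pv_A_eq, if_pos hlen, if_pos hlen]
    have hne : labels ≠ [] := by
      intro he; subst he; exact absurd hlen (by decide)
    exact pv_head_eq labels hne
  · rw [if_neg hlen]
    by_cases hNm : "N" ∈ PySem.Set.ofList labels
    · rw [pv_A_eq, if_neg hlen, if_pos ((PySem.Set.contains_iff _ "N").mpr hNm),
          pv_diff_singleton]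
      have hofl : PySem.Set.ofList (PySem.Set.discard (PySem.Set.ofList labels) "N")
          = PySem.Set.discard (PySem.Set.ofList labels) "N" :=
        PySem.Set.ofList_eq_self_of_nodup _ (PySem.Set.nodup_discard _ "N" hnd)
      have h2 := pv_stage2 (PySem.Set.discard (PySem.Set.ofList labels) "N") (by
          rw [hofl]
          exact fun hc => ((PySem.Set.mem_discard _ "N" "N").mp hc).2 rfl) (by
          rw [hofl]
          intro he
          have hev : "" ∈ PySem.Set.ofList labels := ((PySem.Set.mem_discard _ "N" "").mp he).1
          have hfe : (PySem.Set.discard (PySem.Set.ofList labels) "N").filter pvP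
              = (PySem.Set.ofList labels).filter pvP := by
            show List.filter _ (List.filter _ _) = _
            rw [List.filter_filter]
            refine List.filter_congr ?_
            intro x _
            show (pvP x && (!(x == "N"))) = pvP x
            unfold pvP
            simp only [bne]
            cases x == "N" <;> cases x == "Q" <;> rfl
          rw [hfe]
          exact hP hev)
      rw [hofl] at h2
      exact h2
    · rw [pv_discard_not_mem _ "N" hNm]
      exact pv_stage2 labels hNm hP

-- ===== VERDICT (by name: the statement is the Claim_ definition above) =====
theorem summarize_label_spec : Claim_equal_summarize_label := by
  intro labels _ hpre
  exact pv_main labels hpre
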